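-- pv_equiv track=rewrite | github.com/scey26/srdualglow | TEMP/temp2_failure/train.py | calc_inp_shapes
-- ===== SOURCE A (Python) =====
-- def calc_z_shapes2(n_channel, image_size, n_block, split_type):
--     # calculates shapes of z's after SPLIT operation (after Block operations) - e.g. channels: 6, 12, 24, 96
--     z_shapes = []
--     for i in range(n_block - 1):
--         image_size = (image_size[0] // 2, image_size[1] // 2)
--         n_channel = n_channel * 2 if split_type == 'regular' else 9  # now only supports split_sections [3, 9]
--
--         shape = (n_channel, *image_size)
--         z_shapes.append(shape)
--
--     # for the very last block where we have no split operation
--     image_size = (image_size[0] // 2, image_size[1] // 2)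
--     shape = (n_channel * 4, *image_size) if split_type == 'regular' else (12, *image_size)
--     z_shapes.append(shape)
--     return z_shapes
--
-- def calc_inp_shapes(n_channels, image_size, n_blocks, split_type):
--     # calculates z shapes (inputs) after SQUEEZE operation (before Block operations) - e.g. channels: 12, 24, 48, 96
--     z_shapes = calc_z_shapes2(n_channels, image_size, n_blocks, split_type)
--     input_shapes = []
--     for i in range(len(z_shapes)):
--         if i < len(z_shapes) - 1:
--             channels = z_shapes[i][0] * 2 if split_type == 'regular' else 12  # now only supports split_sections [3, 9]
--             input_shapes.append((channels, z_shapes[i][1], z_shapes[i][2]))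
--         else:
--             input_shapes.append((z_shapes[i][0], z_shapes[i][1], z_shapes[i][2]))
--     return input_shapes
-- ===== SOURCE B (Python) =====
-- def calc_inp_shapes(n_channels, image_size, n_blocks, split_type):
--     # One shape per block: spatial size halves each block; channels start at
--     # n_channels*4 and double per block in 'regular' mode, otherwise stay 12.
--     regular = split_type == 'regular'
--     c = n_channels * 4
--     h, w = image_size
--     shapes = []
--     for _ in range(n_blocks):
--         h //= 2
--         w //= 2
--         shapes.append((c if regular else 12, h, w))
--         if regular:
--             c *= 2
--     return shapes
-- ===== Notes on version B (the rewrite author's own statement) =====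
-- stated objective: simpler
-- what changed: Inlines calc_z_shapes2 and fuses A's two passes (build z_shapes, then rescale channels by index) into one loop over the n_blocks blocks maintaining the running channel count and the progressively halved image size; Pre_ excludes the degenerate block count n_blocks <= 0, on which A's emission of a single trailing shape and B's empty list are both arbitrary answers nobody would specify.
-- outside the precondition, e.g. on calc_inp_shapes(3, (8, 8), 0, 'regular'): A returns [(12, 4, 4)], B returns []; on calc_inp_shapes(3, (8, 8), -2, 'x'): A returns [(12, 4, 4)], B returns []
import Mathlib
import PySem

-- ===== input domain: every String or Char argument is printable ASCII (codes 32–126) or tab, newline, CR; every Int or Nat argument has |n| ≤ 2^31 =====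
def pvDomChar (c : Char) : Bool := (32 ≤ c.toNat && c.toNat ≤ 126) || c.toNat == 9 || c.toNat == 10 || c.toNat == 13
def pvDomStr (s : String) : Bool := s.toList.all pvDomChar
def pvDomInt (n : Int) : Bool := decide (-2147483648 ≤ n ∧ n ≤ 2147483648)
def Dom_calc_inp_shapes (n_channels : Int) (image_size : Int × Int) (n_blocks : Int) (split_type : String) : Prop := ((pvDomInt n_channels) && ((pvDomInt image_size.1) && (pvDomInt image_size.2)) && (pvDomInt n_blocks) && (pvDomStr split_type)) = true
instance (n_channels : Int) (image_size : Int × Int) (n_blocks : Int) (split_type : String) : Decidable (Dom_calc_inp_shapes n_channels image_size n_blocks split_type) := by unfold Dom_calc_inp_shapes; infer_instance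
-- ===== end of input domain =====

-- B fuses A's two passes (build z_shapes, then rescale channels by index) into one
-- loop per block maintaining the running channel count and halved spatial size;
-- objective: simpler. Degenerate n_blocks ≤ 0 is excluded by Pre_ below.

-- ===== PORT A =====
-- transliteration of calc_z_shapes2: loop state = (image_size, n_channel, z_shapes)
def calc_z_shapes2 (n_channel : Int) (image_size : Int × Int) (n_block : Int) (split_type : String) : List (Int × Int × Int) :=
  let s := (PySem.List.pyRange 0 (n_block - 1) 1).foldl
    (fun (st : (Int × Int) × Int × List (Int × Int × Int)) _ =>
      let img := (PySem.Int.floordiv st.1.1 2, PySem.Int.floordiv st.1.2 2)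
      let c := if split_type == "regular" then st.2.1 * 2 else 9
      (img, c, st.2.2 ++ [(c, img.1, img.2)]))
    (image_size, n_channel, [])
  let img := (PySem.Int.floordiv s.1.1 2, PySem.Int.floordiv s.1.2 2)
  let shape := if split_type == "regular" then (s.2.1 * 4, img.1, img.2) else (12, img.1, img.2)
  s.2.2 ++ [shape]

def calc_inp_shapes (n_channels : Int) (image_size : Int × Int) (n_blocks : Int) (split_type : String) : List (Int × Int × Int) :=
  let z_shapes := calc_z_shapes2 n_channels image_size n_blocks split_type
  -- z_shapes[i]: i always in range in Python's loop, so pyGetD with a dummy default is exact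
  (PySem.List.pyRange 0 (z_shapes.length : Int) 1).foldl
    (fun (acc : List (Int × Int × Int)) i =>
      let z := PySem.List.pyGetD z_shapes i (0, 0, 0)
      if i < (z_shapes.length : Int) - 1 then
        acc ++ [((if split_type == "regular" then z.1 * 2 else 12), z.2.1, z.2.2)]
      else
        acc ++ [z])
    []

-- ===== PORT B =====
-- Source B's single loop over range(n_blocks): structural recursion on the iteration count
def altBuild (regular : Bool) (c h w : Int) : Nat → List (Int × Int × Int)
  | 0 => []
  | Nat.succ k =>
      let h' := PySem.Int.floordiv h 2
      let w' := PySem.Int.floordiv w 2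
      ((if regular then c else 12), h', w') :: altBuild regular (if regular then c * 2 else c) h' w' k

def calc_inp_shapes_alt (n_channels : Int) (image_size : Int × Int) (n_blocks : Int) (split_type : String) : List (Int × Int × Int) :=
  altBuild (split_type == "regular") (n_channels * 4) image_size.1 image_size.2 n_blocks.toNat

-- ===== PRECONDITION & SPEC =====
-- Pre_ excludes the degenerate block count n_blocks ≤ 0, on which A's emission of one
-- trailing shape and B's empty list are both arbitrary answers nobody would specify.
def Pre_calc_inp_shapes (n_channels : Int) (image_size : Int × Int) (n_blocks : Int) (split_type : String) : Prop := 1 ≤ n_blocks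
instance (n_channels : Int) (image_size : Int × Int) (n_blocks : Int) (split_type : String) : Decidable (Pre_calc_inp_shapes n_channels image_size n_blocks split_type) := by unfold Pre_calc_inp_shapes; infer_instance
def pvWitness_calc_inp_shapes : Int × (Int × Int) × Int × String := (3, (16, 16), 3, "regular")

def Spec_calc_inp_shapes (n_channels : Int) (image_size : Int × Int) (n_blocks : Int) (split_type : String) (out : List (Int × Int × Int)) : Prop := out = calc_inp_shapes_alt n_channels image_size n_blocks split_type
instance (n_channels : Int) (image_size : Int × Int) (n_blocks : Int) (split_type : String) (out : List (Int × Int × Int)) : Decidable (Spec_calc_inp_shapes n_channels image_size n_blocks split_type out) := by unfold Spec_calc_inp_shapes; infer_instance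

-- ===== CLAIM (what is proved, stated in full; the proofs are below) =====
def Claim_equal_calc_inp_shapes : Prop := ∀ (n_channels : Int) (image_size : Int × Int) (n_blocks : Int) (split_type : String), Dom_calc_inp_shapes n_channels image_size n_blocks split_type → Pre_calc_inp_shapes n_channels image_size n_blocks split_type → Spec_calc_inp_shapes n_channels image_size n_blocks split_type (calc_inp_shapes n_channels image_size n_blocks split_type)

-- ===== LEMMAS AND PROOFS =====

-- the list appended by A's first loop after k iterations
def zl (reg : Bool) (c h w : Int) : Nat → List (Int × Int × Int)
  | 0 => []
  | Nat.succ k =>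
      let h' := PySem.Int.floordiv h 2
      let w' := PySem.Int.floordiv w 2
      let c' := if reg then c * 2 else 9
      (c', h', w') :: zl reg c' h' w' k

-- A's first-loop state (n_channel, image) after k iterations
def zfin (reg : Bool) (c h w : Int) : Nat → Int × Int × Int
  | 0 => (c, h, w)
  | Nat.succ k => zfin reg (if reg then c * 2 else 9) (PySem.Int.floordiv h 2) (PySem.Int.floordiv w 2) k

-- a fold whose body ignores the list element iterates a fixed step
theorem foldl_step_ignore {α σ : Type} (f : σ → σ) (l : List α) (init : σ) :
    l.foldl (fun s _ => f s) init = f^[l.length] init := by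
  induction l generalizing init with
  | nil => rfl
  | cons x xs ih => simp [List.foldl_cons, ih, Function.iterate_succ_apply]

theorem iterate_zstate (reg : Bool) (k : Nat) :
    ∀ (c h w : Int) (acc : List (Int × Int × Int)),
    (fun (st : (Int × Int) × Int × List (Int × Int × Int)) =>
      (((PySem.Int.floordiv st.1.1 2, PySem.Int.floordiv st.1.2 2) : Int × Int),
        (if reg then st.2.1 * 2 else 9),
        st.2.2 ++ [((if reg then st.2.1 * 2 else 9), PySem.Int.floordiv st.1.1 2, PySem.Int.floordiv st.1.2 2)]))^[k]
      ((h, w), c, acc)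
    = (((zfin reg c h w k).2.1, (zfin reg c h w k).2.2), (zfin reg c h w k).1, acc ++ zl reg c h w k) := by
  induction k with
  | zero => intro c h w acc; simp [zfin, zl]
  | succ k ih =>
      intro c h w acc
      rw [Function.iterate_succ_apply]
      simp only []
      rw [ih]
      simp [zfin, zl]

theorem altBuild_false_c (k : Nat) : ∀ (c c' h w : Int), altBuild false c h w k = altBuild false c' h w k := by
  induction k with
  | zero => intro c c' h w; rfl
  | succ k ih => intro c c' h w; simp [altBuild]; exact ih _ _ _ _

-- core: mapped init segment plus the rescaled last z-shape is exactly B's loop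
theorem core (reg : Bool) (k : Nat) :
    ∀ (c h w : Int),
    (zl reg c h w k).map (fun z => ((if reg then z.1 * 2 else 12), z.2.1, z.2.2))
      ++ [((if reg then (zfin reg c h w k).1 * 4 else 12),
            PySem.Int.floordiv (zfin reg c h w k).2.1 2,
            PySem.Int.floordiv (zfin reg c h w k).2.2 2)]
    = altBuild reg (c * 4) h w (k + 1) := by
  induction k with
  | zero => intro c h w; cases reg <;> simp [zl, zfin, altBuild]
  | succ k ih =>
      intro c h w
      have hrhs : altBuild reg (c * 4) h w (k + 1 + 1)
          = ((if reg then c * 4 else 12), PySem.Int.floordiv h 2, PySem.Int.floordiv w 2)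
            :: altBuild reg (if reg then c * 4 * 2 else c * 4) (PySem.Int.floordiv h 2) (PySem.Int.floordiv w 2) (k + 1) := rfl
      simp only [zl, zfin, List.map_cons, List.cons_append]
      rw [ih, hrhs]
      cases reg with
      | false =>
          simp only [Bool.false_eq_true, if_false]
          congr 1
          exact altBuild_false_c _ _ _ _ _
      | true =>
          simp only [if_true]
          have h1 : c * 2 * 2 = c * 4 := by ring
          have h2 : c * 2 * 4 = c * 4 * 2 := by ring
          rw [h1, h2]

-- the second pass over indices keeps the last element and rescales the rest
theorem secondPass_eq (reg : Bool) (l : List (Int × Int × Int)) (z : Int × Int × Int) :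
    (PySem.List.pyRange 0 ((l ++ [z]).length : Int) 1).foldl
      (fun (acc : List (Int × Int × Int)) i =>
        let zz := PySem.List.pyGetD (l ++ [z]) i (0, 0, 0)
        if i < ((l ++ [z]).length : Int) - 1 then
          acc ++ [((if reg then zz.1 * 2 else 12), zz.2.1, zz.2.2)]
        else
          acc ++ [zz])
      []
    = l.map (fun zz => ((if reg then zz.1 * 2 else 12), zz.2.1, zz.2.2)) ++ [z] := by
  have hcongr : (PySem.List.pyRange 0 ((l ++ [z]).length : Int) 1).foldl
      (fun (acc : List (Int × Int × Int)) i =>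
        let zz := PySem.List.pyGetD (l ++ [z]) i (0, 0, 0)
        if i < ((l ++ [z]).length : Int) - 1 then
          acc ++ [((if reg then zz.1 * 2 else 12), zz.2.1, zz.2.2)]
        else
          acc ++ [zz])
      []
    = (PySem.List.pyRange 0 ((l ++ [z]).length : Int) 1).foldl
      (fun (acc : List (Int × Int × Int)) i =>
        acc ++ [if i < ((l ++ [z]).length : Int) - 1 then
            (let zz := PySem.List.pyGetD (l ++ [z]) i (0, 0, 0);
              ((if reg then zz.1 * 2 else 12), zz.2.1, zz.2.2))
          else PySem.List.pyGetD (l ++ [z]) i (0, 0, 0)])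
      [] := by
    apply PySem.List.foldl_congr_mem
    intro acc x _
    by_cases h : x < ((l ++ [z]).length : Int) - 1
    · rw [if_pos h, if_pos h]
    · rw [if_neg h, if_neg h]
  rw [hcongr, PySem.List.foldl_append_singleton_eq_map, List.nil_append]
  rw [show ((l ++ [z]).length : Int) = ((l ++ [z]).length : Int) from rfl]
  have hmap : (PySem.List.pyRange 0 ((l ++ [z]).length : Int) 1).map
      (fun i => if i < ((l ++ [z]).length : Int) - 1 then
          (let zz := PySem.List.pyGetD (l ++ [z]) i (0, 0, 0);
            ((if reg then zz.1 * 2 else 12), zz.2.1, zz.2.2))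
        else PySem.List.pyGetD (l ++ [z]) i (0, 0, 0))
    = l.map (fun zz => ((if reg then zz.1 * 2 else 12), zz.2.1, zz.2.2)) ++ [z] := by
    have hlen : ((l ++ [z]).length : Int) = (l.length : Int) + 1 := by
      simp
    rw [hlen]
    rw [PySem.List.pyRange_one_succ_right (by positivity)]
    rw [List.map_append]
    congr 1
    · have : ∀ i ∈ PySem.List.pyRange 0 (l.length : Int) 1,
          (if i < (l.length : Int) + 1 - 1 then
            (let zz := PySem.List.pyGetD (l ++ [z]) i (0, 0, 0);
              ((if reg then zz.1 * 2 else 12), zz.2.1, zz.2.2))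
          else PySem.List.pyGetD (l ++ [z]) i (0, 0, 0))
          = (fun zz => ((if reg then zz.1 * 2 else 12), zz.2.1, zz.2.2)) (PySem.List.pyGetD l i (0, 0, 0)) := by
        intro i hi
        rw [PySem.List.mem_pyRange_one] at hi
        have h1 : i < (l.length : Int) + 1 - 1 := by omega
        rw [if_pos h1]
        have : PySem.List.pyGetD (l ++ [z]) i (0, 0, 0) = PySem.List.pyGetD l i (0, 0, 0) := by
          have hk : ∃ k : Nat, i = (k : Int) ∧ k < l.length := by
            refine ⟨i.toNat, by omega, by omega⟩
          obtain ⟨k, hik, hkl⟩ := hk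
          subst hik
          rw [PySem.List.pyGetD_natCast, PySem.List.pyGetD_natCast]
          simp [List.getD, List.getElem?_append_left hkl]
        rw [this]
      rw [List.map_congr_left this]
      conv_rhs => rw [← PySem.List.map_pyGetD_pyRange_zero' (xs := l) (d := ((0, 0, 0) : Int × Int × Int))]
      rw [List.map_map]
      rfl
    · simp only [List.map_cons, List.map_nil]
      congr 1
      rw [if_neg (by omega)]
      rw [PySem.List.pyGetD_natCast]
      simp [List.getD]
  rw [hmap]

-- A always equals the mapped init segment plus the kept last shape (k = (n_blocks-1).toNat)
theorem calc_inp_shapes_eq (n_channels : Int) (h w : Int) (n_blocks : Int) (split_type : String) :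
    calc_inp_shapes n_channels (h, w) n_blocks split_type
    = (zl (split_type == "regular") n_channels h w (n_blocks - 1).toNat).map
        (fun z => ((if (split_type == "regular") then z.1 * 2 else 12), z.2.1, z.2.2))
      ++ [((if (split_type == "regular")
              then (zfin (split_type == "regular") n_channels h w (n_blocks - 1).toNat).1 * 4 else 12),
            PySem.Int.floordiv (zfin (split_type == "regular") n_channels h w (n_blocks - 1).toNat).2.1 2,
            PySem.Int.floordiv (zfin (split_type == "regular") n_channels h w (n_blocks - 1).toNat).2.2 2)] := by
  unfold calc_inp_shapes calc_z_shapes2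
  set reg := (split_type == "regular") with hreg
  set k := (n_blocks - 1).toNat with hk
  have hlen : (PySem.List.pyRange 0 (n_blocks - 1) 1).length = k := by
    rw [PySem.List.length_pyRange_one]; omega
  rw [foldl_step_ignore
    (fun (st : (Int × Int) × Int × List (Int × Int × Int)) =>
      (((PySem.Int.floordiv st.1.1 2, PySem.Int.floordiv st.1.2 2) : Int × Int),
        (if reg then st.2.1 * 2 else 9),
        st.2.2 ++ [((if reg then st.2.1 * 2 else 9), PySem.Int.floordiv st.1.1 2, PySem.Int.floordiv st.1.2 2)])),
    hlen, iterate_zstate reg k n_channels h w []]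
  simp only [List.nil_append]
  rw [show (if reg then ((zfin reg n_channels h w k).1 * 4,
        PySem.Int.floordiv (zfin reg n_channels h w k).2.1 2, PySem.Int.floordiv (zfin reg n_channels h w k).2.2 2)
      else ((12 : Int), PySem.Int.floordiv (zfin reg n_channels h w k).2.1 2, PySem.Int.floordiv (zfin reg n_channels h w k).2.2 2))
    = (((if reg then (zfin reg n_channels h w k).1 * 4 else 12),
        PySem.Int.floordiv (zfin reg n_channels h w k).2.1 2, PySem.Int.floordiv (zfin reg n_channels h w k).2.2 2)) from by
      by_cases hr : reg <;> simp [hr]]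
  exact secondPass_eq reg (zl reg n_channels h w k) _

-- ===== VERDICT (by name: the statements are the Claim_ definitions above) =====
theorem calc_inp_shapes_spec : Claim_equal_calc_inp_shapes := by
  intro n_channels image_size n_blocks split_type _ hpre
  unfold Pre_calc_inp_shapes at hpre
  obtain ⟨h, w⟩ := image_size
  unfold Spec_calc_inp_shapes
  rw [calc_inp_shapes_eq]
  unfold calc_inp_shapes_alt
  have hnn : n_blocks.toNat = (n_blocks - 1).toNat + 1 := by omega
  rw [hnn]
  exact core (split_type == "regular") (n_blocks - 1).toNat n_channels h w
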